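-- pv_equiv track=rewrite | github.com/fixstars/amplify-benchmark | amplify_bench/problem/cvrp.py | __ubOfTour
-- ===== SOURCE A (Python) =====
-- def __ubOfTour(capacity, demand):
--     """
--     ありうる最長のツアー長を計算する関数
--
--     Parameters
--     ----------
--     capacity : int
--         各車両の積載可能量
--     demand : list
--         各需要地の需要
--
--     Returns
--     -------
--     longest_possible_length : int
--         一台の車両が訪問できる需要地数の最大値+2
--     """
--     longest_possible_length = 2
--     tmp = 0
--     for s in sorted(demand):
--         tmp += s
--         if tmp <= capacity:
--             longest_possible_length += 1
--         else:
--             return longest_possible_length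
--     return longest_possible_length
-- ===== SOURCE B (Python) =====
-- def __ubOfTour(capacity, demand):
--     # Selection-based: repeatedly extract the smallest remaining demand
--     # instead of sorting the whole list up front; stops as soon as the
--     # running load exceeds capacity.
--     remaining = list(demand)
--     longest_possible_length = 2
--     tmp = 0
--     while remaining:
--         m = min(remaining)
--         remaining.remove(m)
--         tmp += m
--         if tmp > capacity:
--             return longest_possible_length
--         longest_possible_length += 1
--     return longest_possible_length
-- ===== Notes on version B (the rewrite author's own statement) =====
-- stated objective: alternative
-- what changed: Replaces sort-then-scan with a selection loop that repeatedly extracts the minimum remaining demand and stops at the first capacity overflow, so no full sort is performed.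
import Mathlib
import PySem

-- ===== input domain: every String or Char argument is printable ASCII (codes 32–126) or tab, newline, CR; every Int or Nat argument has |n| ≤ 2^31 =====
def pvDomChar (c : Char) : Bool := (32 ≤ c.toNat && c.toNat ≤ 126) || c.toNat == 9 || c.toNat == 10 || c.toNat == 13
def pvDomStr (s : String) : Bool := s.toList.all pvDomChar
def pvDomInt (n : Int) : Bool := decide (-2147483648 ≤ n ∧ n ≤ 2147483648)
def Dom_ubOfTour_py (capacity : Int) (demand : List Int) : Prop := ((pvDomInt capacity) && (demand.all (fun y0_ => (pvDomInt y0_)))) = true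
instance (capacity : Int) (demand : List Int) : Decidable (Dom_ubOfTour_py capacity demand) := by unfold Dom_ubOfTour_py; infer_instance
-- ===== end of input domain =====

-- B replaces sort-then-scan by a selection loop (repeated min extraction with early exit); alternative algorithm, same results.


-- ===== PORT A =====
-- the 'for s in sorted(demand)' loop with early return, as structural recursion on the sorted list
def ubGoA (capacity : Int) : List Int → Int → Int → Int
  | [], longest, _ => longest
  | s :: rest, longest, tmp =>
    let tmp' := tmp + s
    if tmp' ≤ capacity then ubGoA capacity rest (longest + 1) tmp'
    else longest

def ubOfTour_py (capacity : Int) (demand : List Int) : Int :=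
  ubGoA capacity (PySem.List.sorted demand (fun x => x) false) 2 0

-- ===== PORT B =====
-- the 'while remaining:' selection loop; fuel = remaining.length (each iteration removes one element)
def ubGoB (capacity : Int) : Nat → List Int → Int → Int → Int
  | 0, _, longest, _ => longest
  | k + 1, remaining, longest, tmp =>
    match PySem.List.min? remaining (fun x => x) with
    | none => longest          -- remaining is empty: while loop ends
    | some m =>
      match PySem.List.remove? remaining m with
      | none => longest        -- unreachable: m ∈ remaining
      | some rest =>
        let tmp' := tmp + m
        if tmp' > capacity then longest
        else ubGoB capacity k rest (longest + 1) tmp'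

def ubOfTour_py_alt (capacity : Int) (demand : List Int) : Int :=
  ubGoB capacity demand.length demand 2 0

-- ===== PRECONDITION & SPEC =====
def Spec_ubOfTour_py (capacity : Int) (demand : List Int) (out : Int) : Prop := out = ubOfTour_py_alt capacity demand
instance (capacity : Int) (demand : List Int) (out : Int) : Decidable (Spec_ubOfTour_py capacity demand out) := by unfold Spec_ubOfTour_py; infer_instance

-- ===== CLAIM (what is proved, stated in full; the proofs are below) =====
def Claim_equal_ubOfTour_py : Prop := ∀ (capacity : Int) (demand : List Int), Dom_ubOfTour_py capacity demand → Spec_ubOfTour_py capacity demand (ubOfTour_py capacity demand)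

-- ===== LEMMAS AND PROOFS =====

-- extracting the minimum and sorting the rest is the same as sorting the whole list
theorem sorted_eq_min_cons (l : List Int) (m : Int)
    (hm : PySem.List.min? l (fun x => x) = some m) :
    PySem.List.sorted l (fun x => x) false =
      m :: PySem.List.sorted (l.erase m) (fun x => x) false := by
  have hmem : m ∈ l := PySem.List.min?_mem hm
  apply PySem.List.sorted_id_eq_of_perm_of_pairwise
  · exact ((PySem.List.sorted_perm _ _ _).cons m).trans (List.perm_cons_erase hmem).symm
  · refine List.pairwise_cons.mpr ⟨?_, PySem.List.sorted_pairwise _ _⟩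
    intro y hy
    have : y ∈ l.erase m := (PySem.List.mem_sorted _ _ _ _).1 hy
    exact PySem.List.min?_isMin hm y (List.mem_of_mem_erase this)

theorem ubGoB_eq_ubGoA (capacity : Int) :
    ∀ (n : Nat) (l : List Int), l.length = n → ∀ (longest tmp : Int),
      ubGoB capacity n l longest tmp =
        ubGoA capacity (PySem.List.sorted l (fun x => x) false) longest tmp := by
  intro n
  induction n with
  | zero =>
    intro l hl longest tmp
    have : l = [] := List.length_eq_zero_iff.mp hl
    subst this
    simp [ubGoA, PySem.List.sorted]
    rfl
  | succ k ih =>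
    intro l hl longest tmp
    have hne : l ≠ [] := by intro h; subst h; simp at hl
    obtain ⟨m, hm⟩ : ∃ m, PySem.List.min? l (fun x => x) = some m := by
      cases h : PySem.List.min? l (fun x => x) with
      | none => exact absurd ((PySem.List.min?_eq_none_iff l (fun x => x)).mp h) hne
      | some m => exact ⟨m, rfl⟩
    have hmem : m ∈ l := PySem.List.min?_mem hm
    have hrem : PySem.List.remove? l m = some (l.erase m) :=
      PySem.List.remove?_eq_some_erase l m hmem
    have hlen : (l.erase m).length = k := by
      have := List.length_erase_of_mem hmem
      omega
    rw [sorted_eq_min_cons l m hm]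
    simp only [ubGoB, ubGoA, hm, hrem]
    by_cases hc : tmp + m ≤ capacity
    · simp only [hc, if_pos, if_neg (not_lt.mpr hc)]
      exact ih (l.erase m) hlen (longest + 1) (tmp + m)
    · simp [hc, lt_of_not_ge hc]

-- ===== VERDICT (by name: the statement is the Claim_ definition above) =====
theorem ubOfTour_py_spec : Claim_equal_ubOfTour_py := by
  intro capacity demand _
  unfold Spec_ubOfTour_py ubOfTour_py ubOfTour_py_alt
  exact (ubGoB_eq_ubGoA capacity demand.length demand rfl 2 0).symm
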